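-- pv_equiv track=rewrite | github.com/YiyuZh/HireMate | src/screener.py | _find_match_position
-- ===== SOURCE A (Python) =====
-- def _find_match_position(text: str, keywords: list[str]) -> int:
--     lowered = (text or "").lower()
--     positions: list[int] = []
--     for keyword in keywords:
--         clean = str(keyword or "").strip()
--         if not clean:
--             continue
--         idx = lowered.find(clean.lower())
--         if idx >= 0:
--             positions.append(idx)
--     return min(positions) if positions else -1
-- ===== SOURCE B (Python) =====
-- def _find_match_position(text: str, keywords: list[str]) -> int:
--     # Single left-to-right scan: return the first text index where any cleaned
--     # keyword starts (str.startswith accepts a tuple), instead of one find()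
--     # pass per keyword followed by min().
--     lowered = (text or "").lower()
--     pats = tuple(k.strip().lower() for k in keywords if k.strip())
--     if not pats:
--         return -1
--     for i in range(len(lowered)):
--         if lowered.startswith(pats, i):
--             return i
--     return -1
-- ===== Notes on version B (the rewrite author's own statement) =====
-- stated objective: faster
-- what changed: Instead of running one full find() pass per keyword and taking the minimum, B scans the text left-to-right once and returns the first index at which any cleaned keyword starts (str.startswith with a tuple), exiting at the earliest match.
import Mathlib
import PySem

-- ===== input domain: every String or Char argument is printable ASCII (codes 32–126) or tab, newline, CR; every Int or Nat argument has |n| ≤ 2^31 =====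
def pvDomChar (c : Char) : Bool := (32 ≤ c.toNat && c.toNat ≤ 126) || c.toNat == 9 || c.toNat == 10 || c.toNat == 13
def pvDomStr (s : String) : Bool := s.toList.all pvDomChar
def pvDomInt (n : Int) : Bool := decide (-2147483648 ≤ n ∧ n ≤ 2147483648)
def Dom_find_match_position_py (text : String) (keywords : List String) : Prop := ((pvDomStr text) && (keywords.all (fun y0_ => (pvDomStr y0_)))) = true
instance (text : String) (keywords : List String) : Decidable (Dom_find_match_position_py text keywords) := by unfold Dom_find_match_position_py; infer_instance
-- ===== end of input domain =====

-- B replaces A's per-keyword find()+min with a single left-to-right scan returning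
-- the first index where any cleaned keyword starts (stops at the earliest match instead of one full find() pass per keyword).

-- ===== PORT A =====
-- literal port of A: one find() per cleaned keyword, collect hits, min or -1
def find_match_position_py (text : String) (keywords : List String) : Int :=
  let lowered := PySem.Str.lower (if text = "" then "" else text)
  let positions := keywords.foldl (fun positions keyword =>
      let clean := PySem.Str.strip (if keyword = "" then "" else keyword)
      if clean = "" then positions
      else
        let idx := PySem.Str.find lowered (PySem.Str.lower clean)
        if 0 ≤ idx then positions ++ [idx] else positions) ([] : List Int)
  match PySem.List.min? positions (fun x => x) with
  | some m => m
  | none => -1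

-- ===== PORT B =====
-- the cleaned patterns: [k.strip().lower() for k in keywords if k.strip()]
def pvPats (keywords : List String) : List (List Char) :=
  (keywords.filter (fun k => PySem.Str.strip k ≠ "")).map
    (fun k => (PySem.Str.lower (PySem.Str.strip k)).toList)

-- the `for i in range(len(lowered)): if lowered.startswith(pats, i)` scan;
-- `lowered.startswith(p, i)` is ported exactly as `startswith (lowered.drop i) p`,
-- the index being rebuilt by the `+ 1` on the way out
def pvScan (pats : List (List Char)) : List Char → Option Nat
  | [] => none
  | c :: rest =>
    if pats.any (fun p => PySem.Chars.startswith (c :: rest) p) then some 0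
    else (pvScan pats rest).map (· + 1)

def find_match_position_py_alt (text : String) (keywords : List String) : Int :=
  let lowered := PySem.Str.lower (if text = "" then "" else text)
  let pats := pvPats keywords
  if pats = [] then -1
  else
    match pvScan pats lowered.toList with
    | some i => (i : Int)
    | none => -1

-- ===== PRECONDITION & SPEC =====
def Spec_find_match_position_py (text : String) (keywords : List String) (out : Int) : Prop := out = find_match_position_py_alt text keywords
instance (text : String) (keywords : List String) (out : Int) : Decidable (Spec_find_match_position_py text keywords out) := by unfold Spec_find_match_position_py; infer_instance

-- ===== CLAIM (what is proved, stated in full; the proofs are below) =====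
def Claim_equal_find_match_position_py : Prop := ∀ (text : String) (keywords : List String), Dom_find_match_position_py text keywords → Spec_find_match_position_py text keywords (find_match_position_py text keywords)

-- ===== LEMMAS AND PROOFS =====

-- A's hit list, reshaped: the find() results of the cleaned patterns that are ≥ 0
def pvPos (L : List Char) (keywords : List String) : List Int :=
  ((pvPats keywords).map (fun p => PySem.Chars.find L p)).filter (fun x => 0 ≤ x)

lemma pv_orEmpty (k : String) : (if k = "" then "" else k) = k := by
  split <;> simp_all

lemma pv_foldA_eq (L : String) (ks : List String) (acc : List Int) :
    ks.foldl (fun positions keyword =>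
      let clean := PySem.Str.strip (if keyword = "" then "" else keyword)
      if clean = "" then positions
      else
        let idx := PySem.Str.find L (PySem.Str.lower clean)
        if 0 ≤ idx then positions ++ [idx] else positions) acc
    = acc ++ pvPos L.toList ks := by
  induction ks generalizing acc with
  | nil => simp [pvPos, pvPats]
  | cons k t ih =>
    rw [List.foldl_cons]
    simp only [pv_orEmpty k]
    by_cases h : PySem.Str.strip k = ""
    · rw [if_pos h, ih]
      congr 1
      simp [pvPos, pvPats, h]
    · rw [if_neg h]
      by_cases h2 : 0 ≤ PySem.Str.find L (PySem.Str.lower (PySem.Str.strip k))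
      · rw [if_pos h2, ih]
        simp at h2
        simp [pvPos, pvPats, h, h2]
      · rw [if_neg h2, ih]
        congr 1
        simp at h2
        simp [pvPos, pvPats, h, h2, not_le.mpr]

lemma pv_pats_ne_nil (keywords : List String) : ∀ p ∈ pvPats keywords, p ≠ [] := by
  intro p hp
  simp [pvPats] at hp
  obtain ⟨k, ⟨hk, hne⟩, rfl⟩ := hp
  simp [PySem.Chars.lower]
  intro hc
  have : (PySem.Str.strip k).toList = [] := by simp [hc]
  exact hne (String.toList_eq_nil_iff.mp this)

lemma pvScan_none (pats : List (List Char)) (s : List Char)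
    (h : ∀ i, ∀ p ∈ pats, ¬ p <+: s.drop i) : pvScan pats s = none := by
  induction s with
  | nil => rfl
  | cons c rest ih =>
    have hany : pats.any (fun p => PySem.Chars.startswith (c :: rest) p) = false := by
      simp only [List.any_eq_false]
      intro p hp
      rw [PySem.Chars.startswith_iff]
      simpa using h 0 p hp
    rw [pvScan, hany]
    simp [ih (fun i p hp => by simpa using h (i + 1) p hp)]

lemma pvScan_some (pats : List (List Char)) (hne : ∀ p ∈ pats, p ≠ []) :
    ∀ (s : List Char) (m : Nat), (∃ p ∈ pats, p <+: s.drop m) →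
    (∀ i < m, ∀ p ∈ pats, ¬ p <+: s.drop i) → pvScan pats s = some m := by
  intro s
  induction s with
  | nil =>
    intro m hm _
    obtain ⟨p, hp, hpre⟩ := hm
    simp at hpre
    exact absurd hpre (hne p hp)
  | cons c rest ih =>
    intro m hm hmin
    match m with
    | 0 =>
      have hany : pats.any (fun p => PySem.Chars.startswith (c :: rest) p) = true := by
        obtain ⟨p, hp, hpre⟩ := hm
        exact List.any_eq_true.mpr ⟨p, hp, (PySem.Chars.startswith_iff _ _).mpr (by simpa using hpre)⟩
      rw [pvScan, hany]
      simp
    | Nat.succ k =>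
      have hany : pats.any (fun p => PySem.Chars.startswith (c :: rest) p) = false := by
        simp only [List.any_eq_false]
        intro p hp
        rw [PySem.Chars.startswith_iff]
        simpa using hmin 0 (Nat.succ_pos k) p hp
      rw [pvScan, hany]
      have := ih k (by obtain ⟨p, hp, hpre⟩ := hm; exact ⟨p, hp, by simpa using hpre⟩)
        (fun i hi p hp => by simpa using hmin (i + 1) (Nat.succ_lt_succ hi) p hp)
      simp [this]

lemma pv_mem_pvPos (L : List Char) (keywords : List String) (p : List Char)
    (hp : p ∈ pvPats keywords) (h : 0 ≤ PySem.Chars.find L p) :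
    PySem.Chars.find L p ∈ pvPos L keywords := by
  simp [pvPos, List.mem_filter, List.mem_map]
  exact ⟨⟨p, hp, rfl⟩, h⟩

lemma pv_prefix_drop_find_nonneg (L p : List Char) (i : Nat) (hpre : p <+: L.drop i) :
    0 ≤ PySem.Chars.find L p := by
  rw [PySem.Chars.find_nonneg_iff, ← PySem.Chars.isIn_iff_infix]
  exact (PySem.Chars.exists_prefix_drop_iff_isIn p L).mp ⟨i, hpre⟩

-- ===== VERDICT (by name: the statement is the Claim_ definition above) =====
theorem find_match_position_py_spec : Claim_equal_find_match_position_py := by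
  intro text keywords _
  unfold Spec_find_match_position_py
  unfold find_match_position_py find_match_position_py_alt
  simp only []
  rw [pv_foldA_eq]
  simp only [List.nil_append]
  set L := (PySem.Str.lower (if text = "" then "" else text)).toList with hL
  rcases hmin : PySem.List.min? (pvPos L keywords) (fun x => x) with _ | m
  · have hempty : pvPos L keywords = [] := (PySem.List.min?_eq_none_iff _ _).mp hmin
    by_cases hp : pvPats keywords = []
    · simp [hp]
    · have hscan : pvScan (pvPats keywords) L = none := by
        apply pvScan_none
        intro i p hp' hpre
        have hmem := pv_mem_pvPos L keywords p hp' (pv_prefix_drop_find_nonneg L p i hpre)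
        rw [hempty] at hmem
        simp at hmem
      simp [hp, hscan]
  · have hmem := PySem.List.min?_mem hmin
    have hisMin := PySem.List.min?_isMin hmin
    simp [pvPos, List.mem_filter, List.mem_map] at hmem
    obtain ⟨⟨p₀, hp₀, hFp₀⟩, hnn⟩ := hmem
    have hspec := PySem.Chars.find_spec (s := L) (sub := p₀) (by rw [hFp₀]; exact hnn)
    have hscan : pvScan (pvPats keywords) L = some m.toNat := by
      apply pvScan_some _ (pv_pats_ne_nil keywords)
      · exact ⟨p₀, hp₀, by rw [hFp₀] at hspec; exact hspec.1⟩
      · intro i hi p hp hpre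
        have hfn : 0 ≤ PySem.Chars.find L p := pv_prefix_drop_find_nonneg L p i hpre
        have hle : m ≤ PySem.Chars.find L p := hisMin _ (pv_mem_pvPos L keywords p hp hfn)
        exact (PySem.Chars.find_spec (s := L) (sub := p) hfn).2 i
          (lt_of_lt_of_le hi (by omega)) hpre
    have hpne : pvPats keywords ≠ [] := by
      intro h0
      rw [h0] at hp₀
      simp at hp₀
    simp [hpne, hscan, Int.toNat_of_nonneg hnn]
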